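-- pv_equiv track=rewrite | github.com/gbenor/GiladIsana | SeedFeatures.py | seed_complementary
-- ===== SOURCE A (Python) =====
-- def seed_complementary(seq1, seq2):
--     count_c = 0
--     count_w = 0
--     count_mismatch = 0
--     c = ['AU', 'UA', 'GC', 'CG']
--     w = ['GU', 'UG']
--
--     for i in range(len(seq1)):
--         ss = seq1[i] + seq2[i]
--         if ss in c:
--             count_c += 1
--         elif ss in w:
--             count_w += 1
--         else:
--             count_mismatch+=1
--     result = {'count_c': count_c, 'count_w': count_w, 'count_mismatch' : count_mismatch}
--     return result
-- ===== SOURCE B (Python) =====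
-- def seed_complementary(seq1, seq2):
--     # Stage 1: tally every aligned character pair.
--     tally = {}
--     for i in range(len(seq1)):
--         pair = seq1[i] + seq2[i]
--         tally[pair] = tally.get(pair, 0) + 1
--     # Stage 2: aggregate the tally by category.
--     count_c = sum(tally.get(k, 0) for k in ('AU', 'UA', 'GC', 'CG'))
--     count_w = tally.get('GU', 0) + tally.get('UG', 0)
--     return {'count_c': count_c, 'count_w': count_w,
--             'count_mismatch': len(seq1) - count_c - count_w}
-- ===== Notes on version B (the rewrite author's own statement) =====
-- stated objective: alternative
-- what changed: B first builds a frequency table of all aligned character pairs in one pass, then derives count_c and count_w by summing the table over the complementary/wobble key sets and computes count_mismatch arithmetically as len(seq1) - count_c - count_w, instead of A's per-position three-way branch with three running counters.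
import Mathlib
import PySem

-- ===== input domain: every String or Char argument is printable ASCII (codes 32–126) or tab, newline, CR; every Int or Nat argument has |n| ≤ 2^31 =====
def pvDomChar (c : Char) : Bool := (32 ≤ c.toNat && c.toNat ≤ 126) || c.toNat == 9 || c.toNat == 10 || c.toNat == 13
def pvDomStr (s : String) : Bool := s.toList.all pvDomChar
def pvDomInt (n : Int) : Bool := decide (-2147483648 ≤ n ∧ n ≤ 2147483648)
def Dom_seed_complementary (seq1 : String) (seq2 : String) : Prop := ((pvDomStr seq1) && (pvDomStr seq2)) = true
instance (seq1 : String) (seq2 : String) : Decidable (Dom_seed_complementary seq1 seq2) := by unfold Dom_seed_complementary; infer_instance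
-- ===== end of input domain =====

-- B builds a frequency table of aligned pairs, then aggregates it per category; A keeps three running counters with a per-position branch (alternative decomposition, same cost).


-- ===== PORT A =====
def seed_complementary (seq1 : String) (seq2 : String) : List (String × Int) :=
  let c : List String := ["AU", "UA", "GC", "CG"]
  let w : List String := ["GU", "UG"]
  let l1 := seq1.toList
  let l2 := seq2.toList
  -- pyGetD with any default is exact on Pre_ (every index in range for both strings)
  let st := (PySem.List.pyRange 0 (l1.length : Int) 1).foldl
    (fun (acc : Int × Int × Int) i =>
      let ss := String.ofList [PySem.List.pyGetD l1 i ' ', PySem.List.pyGetD l2 i ' ']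
      if c.contains ss then (acc.1 + 1, acc.2.1, acc.2.2)
      else if w.contains ss then (acc.1, acc.2.1 + 1, acc.2.2)
      else (acc.1, acc.2.1, acc.2.2 + 1))
    (0, 0, 0)
  [("count_c", st.1), ("count_w", st.2.1), ("count_mismatch", st.2.2)]

-- ===== PORT B =====
def seed_complementary_alt (seq1 : String) (seq2 : String) : List (String × Int) :=
  let l1 := seq1.toList
  let l2 := seq2.toList
  let tally := (PySem.List.pyRange 0 (l1.length : Int) 1).foldl
    (fun (d : PySem.Dict String Int) i =>
      let p := String.ofList [PySem.List.pyGetD l1 i ' ', PySem.List.pyGetD l2 i ' ']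
      d.insert p (d.getD p 0 + 1))
    PySem.Dict.empty
  let count_c := ((["AU", "UA", "GC", "CG"] : List String).map (fun k => tally.getD k 0)).sum
  let count_w := tally.getD "GU" 0 + tally.getD "UG" 0
  [("count_c", count_c), ("count_w", count_w),
   ("count_mismatch", (l1.length : Int) - count_c - count_w)]

-- ===== PRECONDITION & SPEC =====
-- Pre_ excludes exactly the inputs where A raises IndexError: seq2 shorter than seq1.
def Pre_seed_complementary (seq1 : String) (seq2 : String) : Prop :=
  seq1.toList.length ≤ seq2.toList.length
instance (seq1 : String) (seq2 : String) : Decidable (Pre_seed_complementary seq1 seq2) := by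
  unfold Pre_seed_complementary; infer_instance
def pvWitness_seed_complementary : String × String := ("AUGC", "UGCA")

def Spec_seed_complementary (seq1 : String) (seq2 : String) (out : List (String × Int)) : Prop := out = seed_complementary_alt seq1 seq2
instance (seq1 : String) (seq2 : String) (out : List (String × Int)) : Decidable (Spec_seed_complementary seq1 seq2 out) := by unfold Spec_seed_complementary; infer_instance

-- ===== CLAIM (what is proved, stated in full; the proofs are below) =====
def Claim_equal_seed_complementary : Prop := ∀ (seq1 : String) (seq2 : String), Dom_seed_complementary seq1 seq2 → Pre_seed_complementary seq1 seq2 → Spec_seed_complementary seq1 seq2 (seed_complementary seq1 seq2)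

-- ===== LEMMAS AND PROOFS =====

-- A's three-counter fold over a list of pair strings, characterised by counts.
lemma foldA_eq (ps : List String) (a b m : Int) :
    ps.foldl
      (fun (acc : Int × Int × Int) ss =>
        if (["AU", "UA", "GC", "CG"] : List String).contains ss then (acc.1 + 1, acc.2.1, acc.2.2)
        else if (["GU", "UG"] : List String).contains ss then (acc.1, acc.2.1 + 1, acc.2.2)
        else (acc.1, acc.2.1, acc.2.2 + 1)) (a, b, m) =
      (a + (ps.count "AU" + ps.count "UA" + ps.count "GC" + ps.count "CG" : Int),
       b + (ps.count "GU" + ps.count "UG" : Int),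
       m + ((ps.length : Int)
            - (ps.count "AU" + ps.count "UA" + ps.count "GC" + ps.count "CG")
            - (ps.count "GU" + ps.count "UG"))) := by
  induction ps generalizing a b m with
  | nil => simp
  | cons x l ih =>
    simp only [List.foldl_cons, List.count_cons, List.length_cons]
    by_cases h1 : x = "AU"
    · subst h1; rw [ih]; simp; omega
    · by_cases h2 : x = "UA"
      · subst h2; rw [ih]; simp; omega
      · by_cases h3 : x = "GC"
        · subst h3; rw [ih]; simp; omega
        · by_cases h4 : x = "CG"
          · subst h4; rw [ih]; simp; omega
          · by_cases h5 : x = "GU"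
            · subst h5; rw [ih]; simp; omega
            · by_cases h6 : x = "UG"
              · subst h6; rw [ih]; simp; omega
              · rw [if_neg (by simp [h1, h2, h3, h4]), if_neg (by simp [h5, h6]), ih]
                simp [h1, h2, h3, h4, h5, h6]
                omega

theorem seed_complementary_spec' (seq1 seq2 : String) :
    seed_complementary seq1 seq2 = seed_complementary_alt seq1 seq2 := by
  unfold seed_complementary seed_complementary_alt
  simp only
  rw [show (PySem.List.pyRange 0 (seq1.toList.length : Int) 1).foldl
        (fun (d : PySem.Dict String Int) i =>
          let p := String.ofList [PySem.List.pyGetD seq1.toList i ' ', PySem.List.pyGetD seq2.toList i ' ']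
          d.insert p (d.getD p 0 + 1)) PySem.Dict.empty
      = ((PySem.List.pyRange 0 (seq1.toList.length : Int) 1).map
          (fun i => String.ofList [PySem.List.pyGetD seq1.toList i ' ', PySem.List.pyGetD seq2.toList i ' '])).foldl
          (fun (d : PySem.Dict String Int) p => d.insert p (d.getD p 0 + 1)) PySem.Dict.empty
      from (List.foldl_map
        (f := fun i => String.ofList [PySem.List.pyGetD seq1.toList i ' ', PySem.List.pyGetD seq2.toList i ' '])
        (g := fun (d : PySem.Dict String Int) p => d.insert p (d.getD p 0 + 1))).symm]
  rw [show (PySem.List.pyRange 0 (seq1.toList.length : Int) 1).foldl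
        (fun (acc : Int × Int × Int) i =>
          let ss := String.ofList [PySem.List.pyGetD seq1.toList i ' ', PySem.List.pyGetD seq2.toList i ' ']
          if (["AU", "UA", "GC", "CG"] : List String).contains ss then (acc.1 + 1, acc.2.1, acc.2.2)
          else if (["GU", "UG"] : List String).contains ss then (acc.1, acc.2.1 + 1, acc.2.2)
          else (acc.1, acc.2.1, acc.2.2 + 1)) ((0 : Int), (0 : Int), (0 : Int))
      = ((PySem.List.pyRange 0 (seq1.toList.length : Int) 1).map
          (fun i => String.ofList [PySem.List.pyGetD seq1.toList i ' ', PySem.List.pyGetD seq2.toList i ' '])).foldl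
          (fun (acc : Int × Int × Int) ss =>
            if (["AU", "UA", "GC", "CG"] : List String).contains ss then (acc.1 + 1, acc.2.1, acc.2.2)
            else if (["GU", "UG"] : List String).contains ss then (acc.1, acc.2.1 + 1, acc.2.2)
            else (acc.1, acc.2.1, acc.2.2 + 1)) ((0 : Int), (0 : Int), (0 : Int))
      from (List.foldl_map
        (f := fun i => String.ofList [PySem.List.pyGetD seq1.toList i ' ', PySem.List.pyGetD seq2.toList i ' '])
        (g := fun (acc : Int × Int × Int) ss =>
          if (["AU", "UA", "GC", "CG"] : List String).contains ss then (acc.1 + 1, acc.2.1, acc.2.2)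
          else if (["GU", "UG"] : List String).contains ss then (acc.1, acc.2.1 + 1, acc.2.2)
          else (acc.1, acc.2.1, acc.2.2 + 1))).symm]
  rw [foldA_eq]
  simp [PySem.Dict.getD_foldl_insert_add_one, PySem.Dict.getD_empty,
        PySem.List.length_pyRange_one]
  omega

-- ===== VERDICT (by name: the statement is the Claim_ definition above) =====
theorem seed_complementary_spec : Claim_equal_seed_complementary := by
  intro seq1 seq2 _ _
  exact seed_complementary_spec' seq1 seq2
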